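-- pv_equiv track=rewrite | github.com/Naammmdz/naver-hackathon-2025 | backend-ai-service/agents/prompts/task_agent_sql_prompts.py | format_task_summary
-- ===== SOURCE A (Python) =====
-- from typing import Dict, Any, List
--
-- def format_task_summary(rows: List[Dict[str, Any]]) -> str:
--     """
--     Format task query results as readable summary
--
--     Args:
--         rows: Task rows from database
--
--     Returns:
--         Formatted summary text
--     """
--     if not rows:
--         return "No tasks found."
--
--     summary = f"**Total Tasks:** {len(rows)}\n\n"
--
--     # Group by status
--     status_groups = {}
--     for row in rows:
--         status = row.get('status', 'Unknown')
--         if status not in status_groups: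
--             status_groups[status] = []
--         status_groups[status].append(row)
--
--     for status, tasks in status_groups.items():
--         summary += f"### {status} ({len(tasks)})\n"
--         for task in tasks[:5]:  # Show first 5
--             title = task.get('title', 'Untitled')
--             priority = task.get('priority', 'Unknown')
--             summary += f"- [{priority}] {title}\n"
--         if len(tasks) > 5:
--             summary += f"... and {len(tasks) - 5} more\n"
--         summary += "\n"
--
--     return summary
-- ===== SOURCE B (Python) =====
-- def format_task_summary(rows):
--     """Format task rows grouped by status (first-appearance order) into summary text."""
--     if not rows:
--         return "No tasks found."
--     statuses = dict.fromkeys(row.get('status', 'Unknown') for row in rows)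
--     parts = [f"**Total Tasks:** {len(rows)}\n\n"]
--     for status in statuses:
--         tasks = [row for row in rows if row.get('status', 'Unknown') == status]
--         parts.append(f"### {status} ({len(tasks)})\n")
--         parts.extend(
--             f"- [{t.get('priority', 'Unknown')}] {t.get('title', 'Untitled')}\n"
--             for t in tasks[:5]
--         )
--         if len(tasks) > 5:
--             parts.append(f"... and {len(tasks) - 5} more\n")
--         parts.append("\n")
--     return "".join(parts)
-- ===== Notes on version B (the rewrite author's own statement) =====
-- stated objective: alternative
-- what changed: Replaces the single-pass dict-of-lists grouping with string accumulation by computing the ordered distinct statuses first (dict.fromkeys) and re-filtering the rows per status, collecting the output pieces in a list joined once at the end.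
import Mathlib
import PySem

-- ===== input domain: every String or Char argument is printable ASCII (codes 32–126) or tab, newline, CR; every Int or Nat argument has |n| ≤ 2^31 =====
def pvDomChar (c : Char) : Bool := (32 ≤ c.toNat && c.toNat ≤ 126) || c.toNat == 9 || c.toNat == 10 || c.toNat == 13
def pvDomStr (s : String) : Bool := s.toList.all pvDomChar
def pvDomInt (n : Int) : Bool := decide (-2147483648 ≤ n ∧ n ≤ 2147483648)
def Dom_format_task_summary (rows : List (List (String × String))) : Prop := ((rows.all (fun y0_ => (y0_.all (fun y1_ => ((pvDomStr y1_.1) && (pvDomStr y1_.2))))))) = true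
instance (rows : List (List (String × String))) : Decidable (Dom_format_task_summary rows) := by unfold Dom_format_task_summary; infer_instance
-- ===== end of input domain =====

-- B replaces A's one-pass dict grouping + string accumulation by dedup'd statuses with a
-- per-status filter, collecting the output pieces in a list joined once (objective: alternative).

-- ===== PORT A =====
def format_task_summary (rows : List (List (String × String))) : String :=
  if rows = [] then "No tasks found."
  else
    let summary := "**Total Tasks:** " ++ PySem.Int.toStr (rows.length : Int) ++ "\n\n"
    let status_groups : PySem.Dict String (List (List (String × String))) :=
      rows.foldl (fun g row =>
        g.modify (PySem.Dict.getD (PySem.Dict.mk row) "status" "Unknown") [] (fun l => l ++ [row]))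
        PySem.Dict.empty
    status_groups.items.foldl (fun summary st =>
      let summary := summary ++ "### " ++ st.1 ++ " (" ++ PySem.Int.toStr (st.2.length : Int) ++ ")\n"
      let summary := (PySem.List.slice st.2 none (some 5)).foldl (fun summary task =>
        summary ++ "- [" ++ PySem.Dict.getD (PySem.Dict.mk task) "priority" "Unknown" ++ "] "
          ++ PySem.Dict.getD (PySem.Dict.mk task) "title" "Untitled" ++ "\n") summary
      let summary := if 5 < st.2.length then
        summary ++ "... and " ++ PySem.Int.toStr ((st.2.length : Int) - 5) ++ " more\n" else summary
      summary ++ "\n") summary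

-- ===== PORT B =====
def format_task_summary_alt (rows : List (List (String × String))) : String :=
  if rows = [] then "No tasks found."
  else
    let statuses := PySem.List.dedup (rows.map (fun row =>
      PySem.Dict.getD (PySem.Dict.mk row) "status" "Unknown"))
    let parts := statuses.foldl (fun parts status =>
      let tasks := rows.filter (fun row =>
        PySem.Dict.getD (PySem.Dict.mk row) "status" "Unknown" == status)
      let parts := parts ++ ["### " ++ status ++ " (" ++ PySem.Int.toStr (tasks.length : Int) ++ ")\n"]
      let parts := parts ++ (PySem.List.slice tasks none (some 5)).map (fun t =>
        "- [" ++ PySem.Dict.getD (PySem.Dict.mk t) "priority" "Unknown" ++ "] "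
          ++ PySem.Dict.getD (PySem.Dict.mk t) "title" "Untitled" ++ "\n")
      let parts := if 5 < tasks.length then
        parts ++ ["... and " ++ PySem.Int.toStr ((tasks.length : Int) - 5) ++ " more\n"] else parts
      parts ++ ["\n"])
      ["**Total Tasks:** " ++ PySem.Int.toStr (rows.length : Int) ++ "\n\n"]
    PySem.Str.join "" parts

-- ===== PRECONDITION & SPEC =====
def Spec_format_task_summary (rows : List (List (String × String))) (out : String) : Prop := out = format_task_summary_alt rows
instance (rows : List (List (String × String))) (out : String) : Decidable (Spec_format_task_summary rows out) := by unfold Spec_format_task_summary; infer_instance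

-- ===== CLAIM (what is proved, stated in full; the proofs are below) =====
def Claim_equal_format_task_summary : Prop := ∀ (rows : List (List (String × String))), Dom_format_task_summary rows → Spec_format_task_summary rows (format_task_summary rows)

-- ===== LEMMAS AND PROOFS =====

-- proof-only abbreviations
def sOf (r : List (String × String)) : String := PySem.Dict.getD (PySem.Dict.mk r) "status" "Unknown"
def lineOf (t : List (String × String)) : String :=
  "- [" ++ PySem.Dict.getD (PySem.Dict.mk t) "priority" "Unknown" ++ "] "
    ++ PySem.Dict.getD (PySem.Dict.mk t) "title" "Untitled" ++ "\n"
def chunkOf (status : String) (tasks : List (List (String × String))) : String :=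
  ("### " ++ status ++ " (" ++ PySem.Int.toStr (tasks.length : Int) ++ ")\n")
  ++ PySem.Str.join "" ((PySem.List.slice tasks none (some 5)).map lineOf)
  ++ (if 5 < tasks.length then "... and " ++ PySem.Int.toStr ((tasks.length : Int) - 5) ++ " more\n" else "")
  ++ "\n"
def piecesOf (rows : List (List (String × String))) (status : String) : List String :=
  let tasks := rows.filter (fun row => sOf row == status)
  ["### " ++ status ++ " (" ++ PySem.Int.toStr (tasks.length : Int) ++ ")\n"]
  ++ (PySem.List.slice tasks none (some 5)).map lineOf
  ++ (if 5 < tasks.length then ["... and " ++ PySem.Int.toStr ((tasks.length : Int) - 5) ++ " more\n"] else [])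
  ++ ["\n"]

lemma str_toList_inj {s t : String} (h : s.toList = t.toList) : s = t :=
  String.toList_inj.mp h

lemma join0_nil : PySem.Str.join "" [] = "" := by
  apply str_toList_inj; simp [PySem.Str.toList_join, PySem.Chars.join_nil]

lemma join0_cons (x : String) (l : List String) :
    PySem.Str.join "" (x :: l) = x ++ PySem.Str.join "" l := by
  apply str_toList_inj
  cases l with
  | nil => simp [PySem.Str.toList_join, PySem.Chars.join_singleton, PySem.Chars.join_nil]
  | cons y t => simp [PySem.Str.toList_join, PySem.Chars.join_cons_cons]

lemma join0_append (a b : List String) :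
    PySem.Str.join "" (a ++ b) = PySem.Str.join "" a ++ PySem.Str.join "" b := by
  induction a with
  | nil => simp [join0_nil]
  | cons x t ih => simp [join0_cons, ih, String.append_assoc]

-- a fold that only appends, over lists / over strings
lemma foldl_app_list {a b : Type} (f : List b -> a -> List b) (g : a -> List b)
    (h : forall acc x, f acc x = acc ++ g x) (l : List a) (acc : List b) :
    l.foldl f acc = acc ++ l.flatMap g := by
  induction l generalizing acc with
  | nil => simp
  | cons x t ih => rw [List.foldl_cons, h, ih, List.flatMap_cons, List.append_assoc]

lemma foldl_app_str {a : Type} (f : String -> a -> String) (g : a -> String)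
    (h : forall acc x, f acc x = acc ++ g x) (l : List a) (acc : String) :
    l.foldl f acc = acc ++ PySem.Str.join "" (l.map g) := by
  induction l generalizing acc with
  | nil => simp [join0_nil]
  | cons x t ih => rw [List.foldl_cons, h, ih, List.map_cons, join0_cons, String.append_assoc]

lemma A_step (acc : String) (st : String × List (List (String × String))) :
    (let summary := acc ++ "### " ++ st.1 ++ " (" ++ PySem.Int.toStr (st.2.length : Int) ++ ")\n"
     let summary := (PySem.List.slice st.2 none (some 5)).foldl (fun summary task =>
       summary ++ "- [" ++ PySem.Dict.getD (PySem.Dict.mk task) "priority" "Unknown" ++ "] "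
         ++ PySem.Dict.getD (PySem.Dict.mk task) "title" "Untitled" ++ "\n") summary
     let summary := if 5 < st.2.length then
       summary ++ "... and " ++ PySem.Int.toStr ((st.2.length : Int) - 5) ++ " more\n" else summary
     summary ++ "\n") = acc ++ chunkOf st.1 st.2 := by
  simp only []
  rw [foldl_app_str _ lineOf (by intro acc x; simp [lineOf, String.append_assoc])]
  unfold chunkOf
  split_ifs <;> simp [String.append_assoc, String.append_empty]

lemma A_outer (items : List (String × List (List (String × String)))) (s0 : String) :
    items.foldl (fun summary st =>
      let summary := summary ++ "### " ++ st.1 ++ " (" ++ PySem.Int.toStr (st.2.length : Int) ++ ")\n"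
      let summary := (PySem.List.slice st.2 none (some 5)).foldl (fun summary task =>
        summary ++ "- [" ++ PySem.Dict.getD (PySem.Dict.mk task) "priority" "Unknown" ++ "] "
          ++ PySem.Dict.getD (PySem.Dict.mk task) "title" "Untitled" ++ "\n") summary
      let summary := if 5 < st.2.length then
        summary ++ "... and " ++ PySem.Int.toStr ((st.2.length : Int) - 5) ++ " more\n" else summary
      summary ++ "\n") s0
    = s0 ++ PySem.Str.join "" (items.map (fun st => chunkOf st.1 st.2)) :=
  foldl_app_str _ _ (fun acc st => A_step acc st) items s0

lemma B_step (rows : List (List (String × String))) (acc : List String) (status : String) :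
    (let tasks := rows.filter (fun row =>
       PySem.Dict.getD (PySem.Dict.mk row) "status" "Unknown" == status)
     let parts := acc ++ ["### " ++ status ++ " (" ++ PySem.Int.toStr (tasks.length : Int) ++ ")\n"]
     let parts := parts ++ (PySem.List.slice tasks none (some 5)).map (fun t =>
       "- [" ++ PySem.Dict.getD (PySem.Dict.mk t) "priority" "Unknown" ++ "] "
         ++ PySem.Dict.getD (PySem.Dict.mk t) "title" "Untitled" ++ "\n")
     let parts := if 5 < tasks.length then
       parts ++ ["... and " ++ PySem.Int.toStr ((tasks.length : Int) - 5) ++ " more\n"] else parts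
     parts ++ ["\n"]) = acc ++ piecesOf rows status := by
  unfold piecesOf sOf lineOf
  simp only []
  split_ifs <;> simp [List.append_assoc]

lemma B_parts (rows : List (List (String × String))) (sts : List String) (acc : List String) :
    sts.foldl (fun parts status =>
      let tasks := rows.filter (fun row =>
        PySem.Dict.getD (PySem.Dict.mk row) "status" "Unknown" == status)
      let parts := parts ++ ["### " ++ status ++ " (" ++ PySem.Int.toStr (tasks.length : Int) ++ ")\n"]
      let parts := parts ++ (PySem.List.slice tasks none (some 5)).map (fun t =>
        "- [" ++ PySem.Dict.getD (PySem.Dict.mk t) "priority" "Unknown" ++ "] "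
          ++ PySem.Dict.getD (PySem.Dict.mk t) "title" "Untitled" ++ "\n")
      let parts := if 5 < tasks.length then
        parts ++ ["... and " ++ PySem.Int.toStr ((tasks.length : Int) - 5) ++ " more\n"] else parts
      parts ++ ["\n"]) acc
    = acc ++ sts.flatMap (piecesOf rows) :=
  foldl_app_list _ _ (fun acc s => B_step rows acc s) sts acc

lemma join0_flatMap_pieces (rows : List (List (String × String))) (sts : List String) :
    PySem.Str.join "" (sts.flatMap (piecesOf rows)) =
      PySem.Str.join "" (sts.map (fun s =>
        chunkOf s (rows.filter (fun row => sOf row == s)))) := by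
  induction sts with
  | nil => simp
  | cons s rest ih =>
    rw [List.flatMap_cons, join0_append, List.map_cons, join0_cons, ih]
    congr 1
    unfold piecesOf chunkOf
    split_ifs <;>
      simp [*, join0_append, join0_cons, join0_nil, String.append_assoc, String.append_empty]

lemma items_char (rows : List (List (String × String))) :
    (rows.foldl (fun g row =>
        g.modify (PySem.Dict.getD (PySem.Dict.mk row) "status" "Unknown") [] (fun l => l ++ [row]))
        PySem.Dict.empty).items
    = (PySem.List.dedup (rows.map sOf)).map
        (fun s => (s, rows.filter (fun row => sOf row == s))) := by
  have hfold : (rows.foldl (fun g row =>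
        g.modify (PySem.Dict.getD (PySem.Dict.mk row) "status" "Unknown") [] (fun l => l ++ [row]))
        PySem.Dict.empty)
      = rows.foldl (fun g row => g.modify (sOf row) [] (fun l => l ++ [row])) PySem.Dict.empty := rfl
  rw [hfold]
  have hnodup : (rows.foldl (fun g row => g.modify (sOf row) [] (fun l => l ++ [row]))
      PySem.Dict.empty).keys.Nodup := by
    exact PySem.Dict.nodup_keys_foldl_modify_key rows sOf [] (fun _ row l => l ++ [row])
      PySem.Dict.empty (by simp [PySem.Dict.keys_empty])
  have hkeys : (rows.foldl (fun g row => g.modify (sOf row) [] (fun l => l ++ [row]))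
      PySem.Dict.empty).keys = PySem.List.dedup (rows.map sOf) := by
    rw [PySem.Dict.keys_foldl_modify_key rows sOf [] (fun _ row l => l ++ [row]) PySem.Dict.empty]
    simp [PySem.Dict.keys_empty, PySem.Set.update_nil_left, PySem.List.dedup_eq_ofList]
  have hgetD : ∀ s, (rows.foldl (fun g row => g.modify (sOf row) [] (fun l => l ++ [row]))
      PySem.Dict.empty).getD s [] = rows.filter (fun row => sOf row == s) := by
    intro s
    have hm : rows.foldl (fun g row => g.modify (sOf row) [] (fun l => l ++ [row])) PySem.Dict.empty
        = (rows.map (fun r => (sOf r, r))).foldl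
            (fun d p => d.modify p.1 [] (fun l => l ++ [p.2])) PySem.Dict.empty := by
      rw [List.foldl_map]
    rw [hm, PySem.Dict.getD_foldl_modify_append]
    simp [List.filter_map, Function.comp_def]
  rw [PySem.Dict.items_eq_map_keys _ hnodup [], hkeys]
  exact List.map_congr_left (fun s _ => by rw [hgetD s])

-- ===== VERDICT (by name: the statement is the Claim_ definition above) =====
theorem format_task_summary_spec : Claim_equal_format_task_summary := by
  intro rows _
  unfold Spec_format_task_summary format_task_summary format_task_summary_alt
  by_cases h : rows = []
  · simp [h]
  · simp only [if_neg h]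
    rw [items_char rows, A_outer, B_parts, join0_append, join0_cons, join0_nil,
        join0_flatMap_pieces, List.map_map]
    simp [String.append_empty, Function.comp_def, sOf]
    rfl
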